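-- pv_equiv track=rewrite | github.com/jeongein574/Pomoplanner | calendarFile.py | findZeroLengths
-- ===== SOURCE A (Python) =====
-- def findZeroLengths(todayList, index):
--     zeroLengths = []
--     currentLength = 0
--     for value in todayList:
--         if value == 0:
--             currentLength += 1
--         elif value == 1 and currentLength > 0:
--             zeroLengths.append(currentLength)
--             currentLength = 0
--     if currentLength > 0:
--         zeroLengths.append(currentLength)
--     if zeroLengths == []:
--         zeroLengths.append(len(todayList))
--     return zeroLengths
-- ===== SOURCE B (Python) =====
-- def findZeroLengths(todayList, index):
--     # Partition at every 1 (delimiters dropped), then count zeros per segment.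
--     segments = []
--     cur = []
--     for v in todayList:
--         if v == 1:
--             segments.append(cur)
--             cur = []
--         else:
--             cur.append(v)
--     segments.append(cur)
--     counts = [c for c in (seg.count(0) for seg in segments) if c > 0]
--     return counts if counts else [len(todayList)]
-- ===== Notes on version B (the rewrite author's own statement) =====
-- stated objective: alternative
-- what changed: Replaces A's single streaming accumulator with a partition-then-reduce structure: split todayList at every 1 into explicit segments, then count zeros per segment and keep the positive counts, with the same len(todayList) fallback.
import Mathlib
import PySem

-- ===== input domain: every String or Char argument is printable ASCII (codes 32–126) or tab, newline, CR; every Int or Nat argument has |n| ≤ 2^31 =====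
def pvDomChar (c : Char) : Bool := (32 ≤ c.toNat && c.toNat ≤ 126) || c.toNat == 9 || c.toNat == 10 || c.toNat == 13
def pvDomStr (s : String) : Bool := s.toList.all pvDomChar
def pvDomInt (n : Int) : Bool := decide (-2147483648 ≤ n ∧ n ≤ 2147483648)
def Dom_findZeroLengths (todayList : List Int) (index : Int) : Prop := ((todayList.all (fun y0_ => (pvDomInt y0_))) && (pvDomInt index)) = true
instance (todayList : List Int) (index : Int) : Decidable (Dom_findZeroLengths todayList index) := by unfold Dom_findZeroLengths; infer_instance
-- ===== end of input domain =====

-- B re-implements A by partition-at-1s then count-zeros-per-segment (alternative decomposition, same cost); proved equal on all inputs.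

-- ===== PORT A =====
-- streaming accumulator: (zeroLengths, currentLength), exactly A's loop body
def fzlStepA (s : List Int × Int) (value : Int) : List Int × Int :=
  if value = 0 then (s.1, s.2 + 1)
  else if value = 1 ∧ s.2 > 0 then (s.1 ++ [s.2], 0)
  else s

def findZeroLengths (todayList : List Int) (index : Int) : List Int :=
  let s := todayList.foldl fzlStepA ([], 0)
  let zeroLengths := if s.2 > 0 then s.1 ++ [s.2] else s.1
  if zeroLengths = [] then [(todayList.length : Int)] else zeroLengths

-- ===== PORT B =====
-- splitting pass of Source B: (segments, cur); 1s are delimiters and are dropped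
def fzlStepB (s : List (List Int) × List Int) (v : Int) : List (List Int) × List Int :=
  if v = 1 then (s.1 ++ [s.2], []) else (s.1, s.2 ++ [v])

def findZeroLengths_alt (todayList : List Int) (index : Int) : List Int :=
  let s := todayList.foldl fzlStepB ([], [])
  let segments := s.1 ++ [s.2]
  let counts := (segments.map (fun seg => ((PySem.List.count seg (0 : Int) : Nat) : Int))).filter (fun c => c > 0)
  if counts = [] then [(todayList.length : Int)] else counts

-- ===== PRECONDITION & SPEC =====
def Spec_findZeroLengths (todayList : List Int) (index : Int) (out : List Int) : Prop := out = findZeroLengths_alt todayList index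
instance (todayList : List Int) (index : Int) (out : List Int) : Decidable (Spec_findZeroLengths todayList index out) := by unfold Spec_findZeroLengths; infer_instance

-- ===== CLAIM (what is proved, stated in full; the proofs are below) =====
def Claim_equal_findZeroLengths : Prop := ∀ (todayList : List Int) (index : Int), Dom_findZeroLengths todayList index → Spec_findZeroLengths todayList index (findZeroLengths todayList index)

-- ===== LEMMAS AND PROOFS =====

-- A's post-loop flush
def fzlFlush (s : List Int × Int) : List Int := if s.2 > 0 then s.1 ++ [s.2] else s.1

-- counts of a list of segments, as in port B
def fzlCounts (segs : List (List Int)) : List Int :=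
  (segs.map (fun seg => ((PySem.List.count seg (0 : Int) : Nat) : Int))).filter (fun c => c > 0)

theorem fzl_count_eq (seg : List Int) : PySem.List.count seg (0 : Int) = seg.count 0 :=
  PySem.List.count_eq seg 0

theorem fzlCounts_cons (cur : List Int) (rest : List (List Int)) :
    fzlCounts (cur :: rest)
      = (if ((cur.count 0 : Nat) : Int) > 0 then [((cur.count 0 : Nat) : Int)] else [])
        ++ fzlCounts rest := by
  simp only [fzlCounts, List.map_cons, fzl_count_eq, List.filter_cons]
  by_cases h : ((cur.count 0 : Nat) : Int) > 0
  · rw [if_pos (by simpa using h), if_pos h]; rfl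
  · rw [if_neg (by simpa using h), if_neg h]; rfl

theorem fzlCounts_single_pos (cur : List Int) (h : ((cur.count 0 : Nat) : Int) > 0) :
    fzlCounts [cur] = [((cur.count 0 : Nat) : Int)] := by
  simp only [fzlCounts, List.map_cons, List.map_nil, fzl_count_eq, List.filter_cons,
    List.filter_nil]
  rw [if_pos (by simpa using h)]

theorem fzlCounts_single_nonpos (cur : List Int) (h : ¬ ((cur.count 0 : Nat) : Int) > 0) :
    fzlCounts [cur] = [] := by
  simp only [fzlCounts, List.map_cons, List.map_nil, fzl_count_eq, List.filter_cons,
    List.filter_nil]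
  rw [if_neg (by simpa using h)]

theorem fzlStepA_zero (zl : List Int) (c : Int) : fzlStepA (zl, c) 0 = (zl, c + 1) := by
  simp [fzlStepA]

theorem fzlStepA_one_pos (zl : List Int) (c : Int) (h : c > 0) :
    fzlStepA (zl, c) 1 = (zl ++ [c], 0) := by
  simp [fzlStepA, h]

theorem fzlStepA_one_nonpos (zl : List Int) (c : Int) (h : ¬ c > 0) :
    fzlStepA (zl, c) 1 = (zl, c) := by
  simp [fzlStepA, h]

theorem fzlStepA_other (zl : List Int) (c v : Int) (h0 : v ≠ 0) (h1 : v ≠ 1) :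
    fzlStepA (zl, c) v = (zl, c) := by
  simp [fzlStepA, h0, h1]

theorem fzlStepB_one (segs : List (List Int)) (cur : List Int) :
    fzlStepB (segs, cur) 1 = (segs ++ [cur], []) := by
  simp [fzlStepB]

theorem fzlStepB_other (segs : List (List Int)) (cur : List Int) (v : Int) (h : v ≠ 1) :
    fzlStepB (segs, cur) v = (segs, cur ++ [v]) := by
  simp [fzlStepB, h]

-- B's fold accumulates segments by appending
theorem fzlStepB_prefix (l : List Int) (segs : List (List Int)) (cur : List Int) :
    l.foldl fzlStepB (segs, cur)
      = (segs ++ (l.foldl fzlStepB ([], cur)).1, (l.foldl fzlStepB ([], cur)).2) := by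
  induction l generalizing segs cur with
  | nil => simp
  | cons v l ih =>
    by_cases hv : v = 1
    · subst hv
      rw [List.foldl_cons, List.foldl_cons, fzlStepB_one, fzlStepB_one,
        ih (segs ++ [cur]) [], ih ([] ++ [cur]) []]
      simp
    · rw [List.foldl_cons, List.foldl_cons, fzlStepB_other _ _ _ hv, fzlStepB_other _ _ _ hv,
        ih segs (cur ++ [v]), ih [] (cur ++ [v])]

-- main invariant: A's flushed result from (zl, count0 cur) equals zl ++ counts of B's segments
theorem fzl_main (l : List Int) (zl : List Int) (cur : List Int) :
    fzlFlush (l.foldl fzlStepA (zl, ((cur.count 0 : Nat) : Int)))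
    = zl ++ fzlCounts ((l.foldl fzlStepB ([], cur)).1 ++ [(l.foldl fzlStepB ([], cur)).2]) := by
  induction l generalizing zl cur with
  | nil =>
    simp only [List.foldl_nil, fzlFlush, List.nil_append]
    by_cases h : ((cur.count 0 : Nat) : Int) > 0
    · rw [if_pos h, fzlCounts_single_pos cur h]
    · rw [if_neg h, fzlCounts_single_nonpos cur h, List.append_nil]
  | cons v l ih =>
    by_cases hv0 : v = 0
    · subst hv0
      rw [List.foldl_cons, List.foldl_cons, fzlStepA_zero, fzlStepB_other _ _ _ (by decide)]
      have hcnt : ((cur.count 0 : Nat) : Int) + 1 = (((cur ++ [(0:Int)]).count 0 : Nat) : Int) := by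
        simp [List.count_append]
      rw [hcnt]
      exact ih zl (cur ++ [0])
    · by_cases hv1 : v = 1
      · subst hv1
        rw [List.foldl_cons, List.foldl_cons, fzlStepB_one, fzlStepB_prefix l ([] ++ [cur]) []]
        simp only [List.nil_append]
        by_cases hc : ((cur.count 0 : Nat) : Int) > 0
        · rw [fzlStepA_one_pos _ _ hc]
          have h := ih (zl ++ [((cur.count 0 : Nat) : Int)]) []
          simp only [List.count_nil, Nat.cast_zero] at h
          rw [h]
          have hm : (0 : Int) ∈ cur := List.count_pos_iff.mp (by exact_mod_cast hc)
          simp [fzlCounts_cons, hm, List.append_assoc]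
        · have hc0 : ((cur.count 0 : Nat) : Int) = 0 := by omega
          rw [fzlStepA_one_nonpos _ _ hc, hc0]
          have h := ih zl []
          simp only [List.count_nil, Nat.cast_zero] at h
          rw [h]
          have hm : (0 : Int) ∉ cur := List.count_eq_zero.mp (by exact_mod_cast hc0)
          simp [fzlCounts_cons, hm]
      · rw [List.foldl_cons, List.foldl_cons, fzlStepA_other _ _ _ hv0 hv1,
          fzlStepB_other _ _ _ hv1]
        have hcnt : ((cur.count 0 : Nat) : Int) = (((cur ++ [v]).count 0 : Nat) : Int) := by
          simp [List.count_append, hv0]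
        rw [hcnt]
        exact ih zl (cur ++ [v])

-- ===== VERDICT (by name: the statement is the Claim_ definition above) =====
theorem findZeroLengths_spec : Claim_equal_findZeroLengths := by
  intro todayList index _
  show findZeroLengths todayList index = findZeroLengths_alt todayList index
  have h := fzl_main todayList [] []
  simp only [List.count_nil, Nat.cast_zero, List.nil_append, fzlFlush, fzlCounts] at h
  simp only [findZeroLengths, findZeroLengths_alt]
  rw [h]
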